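-- pv_equiv track=rewrite | github.com/Suffix30/LANTERNv2.0 | core/bypass.py | overlong_utf8
-- ===== SOURCE A (Python) =====
-- def overlong_utf8(payload: str) -> str:
--     overlong = {
--         "/": "%c0%af",
--         ".": "%c0%2e",
--         "<": "%c0%bc",
--         ">": "%c0%be",
--         "'": "%c0%a7",
--         '"': "%c0%a2",
--     }
--     result = payload
--     for char, enc in overlong.items():
--         result = result.replace(char, enc)
--     return result
-- ===== SOURCE B (Python) =====
-- def overlong_utf8(payload: str) -> str:
--     out = []
--     for ch in payload:
--         if ch == "/":
--             out.append("%c0%af")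
--         elif ch == ".":
--             out.append("%c0%2e")
--         elif ch == "<":
--             out.append("%c0%bc")
--         elif ch == ">":
--             out.append("%c0%be")
--         elif ch == "'":
--             out.append("%c0%a7")
--         elif ch == '"':
--             out.append("%c0%a2")
--         else:
--             out.append(ch)
--     return "".join(out)
-- ===== Notes on version B (the rewrite author's own statement) =====
-- stated objective: simpler
-- what changed: A single left-to-right loop over the characters with an if/elif chain appending each character's encoding (or the character) to an accumulator, instead of six sequential full-string replace passes; equivalent because no encoding contains any of the six replaced characters.
import Mathlib
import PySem

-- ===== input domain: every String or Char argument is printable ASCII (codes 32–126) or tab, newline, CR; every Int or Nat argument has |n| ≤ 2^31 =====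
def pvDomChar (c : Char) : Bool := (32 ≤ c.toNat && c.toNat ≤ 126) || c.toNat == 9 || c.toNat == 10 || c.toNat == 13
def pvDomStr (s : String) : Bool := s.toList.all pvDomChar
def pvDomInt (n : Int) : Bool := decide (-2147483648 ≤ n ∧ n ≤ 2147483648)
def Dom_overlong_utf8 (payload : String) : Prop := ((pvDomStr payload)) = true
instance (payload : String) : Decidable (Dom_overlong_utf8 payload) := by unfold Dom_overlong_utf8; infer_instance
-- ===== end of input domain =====

-- B replaces A's six sequential full-string replace passes with one loop over the characters,
-- an if/elif chain appending the encoding (or the character) to an accumulator (objective: simpler).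

-- ===== PORT A =====
-- the dict literal of A, in insertion order
def overlongPairs : List (String × String) :=
  [("/", "%c0%af"), (".", "%c0%2e"), ("<", "%c0%bc"), (">", "%c0%be"), ("'", "%c0%a7"), ("\"", "%c0%a2")]

def overlong_utf8 (payload : String) : String :=
  overlongPairs.foldl (fun result p => PySem.Str.replace result p.1 p.2) payload

-- ===== PORT B =====
-- B's if/elif chain for one character
def encChar (ch : Char) : String :=
  if ch = '/' then "%c0%af"
  else if ch = '.' then "%c0%2e"
  else if ch = '<' then "%c0%bc"
  else if ch = '>' then "%c0%be"
  else if ch = '\'' then "%c0%a7"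
  else if ch = '"' then "%c0%a2"
  else String.ofList [ch]

def overlong_utf8_alt (payload : String) : String :=
  PySem.Str.join "" (payload.toList.foldl (fun out ch => out ++ [encChar ch]) [])

-- ===== PRECONDITION & SPEC =====
def Spec_overlong_utf8 (payload : String) (out : String) : Prop := out = overlong_utf8_alt payload
instance (payload : String) (out : String) : Decidable (Spec_overlong_utf8 payload out) := by unfold Spec_overlong_utf8; infer_instance

-- ===== CLAIM (what is proved, stated in full; the proofs are below) =====
def Claim_equal_overlong_utf8 : Prop := ∀ (payload : String), Dom_overlong_utf8 payload → Spec_overlong_utf8 payload (overlong_utf8 payload)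

-- ===== LEMMAS AND PROOFS =====

-- the per-character substitution both programs amount to, over character lists
def pvEncOf (c : Char) : List Char :=
  if c = '/' then "%c0%af".toList
  else if c = '.' then "%c0%2e".toList
  else if c = '<' then "%c0%bc".toList
  else if c = '>' then "%c0%be".toList
  else if c = '\'' then "%c0%a7".toList
  else if c = '"' then "%c0%a2".toList
  else [c]

-- replacing a single-character pattern is a per-character flatMap
theorem pv_go_single (k : Char) (new : List Char) :
    ∀ (l : List Char) (fuel : Nat) (acc : List Char), l.length ≤ fuel →
      PySem.Chars.replace.go [k] new fuel l acc
        = acc.reverse ++ l.flatMap (fun c => if c = k then new else [c]) := by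
  intro l
  induction l with
  | nil =>
    intro fuel acc _
    cases fuel <;> simp [PySem.Chars.replace.go]
  | cons c t ih =>
    intro fuel acc hf
    cases fuel with
    | zero => simp at hf
    | succ f =>
      by_cases hc : c = k
      · subst hc
        have : [c].isPrefixOf (c :: t) = true := by simp [List.isPrefixOf]
        simp only [PySem.Chars.replace.go, this, if_true, List.length_cons, List.length_nil,
          List.drop_succ_cons, List.drop_zero]
        rw [ih f (new.reverse ++ acc) (by simpa using Nat.succ_le_succ_iff.mp hf)]
        simp
      · have : [k].isPrefixOf (c :: t) = false := by
          simp [List.isPrefixOf]; exact fun h => (hc h.symm).elim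
        simp only [PySem.Chars.replace.go, this, if_false, Bool.false_eq_true]
        rw [ih f (c :: acc) (by simpa using Nat.succ_le_succ_iff.mp hf)]
        simp [hc]

theorem pv_replace_single (k : Char) (new s : List Char) :
    PySem.Chars.replace s [k] new = s.flatMap (fun c => if c = k then new else [c]) := by
  rw [PySem.Chars.replace]
  simp only [List.isEmpty_cons, Bool.false_eq_true, if_false]
  simpa using pv_go_single k new s s.length [] (le_refl _)

-- A's six cascaded single-char substitutions collapse to pvEncOf
theorem pv_chain_single (c : Char) :
    (((((([c].flatMap (fun x => if x = '/' then "%c0%af".toList else [x])).flatMap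
        (fun x => if x = '.' then "%c0%2e".toList else [x])).flatMap
        (fun x => if x = '<' then "%c0%bc".toList else [x])).flatMap
        (fun x => if x = '>' then "%c0%be".toList else [x])).flatMap
        (fun x => if x = '\'' then "%c0%a7".toList else [x])).flatMap
        (fun x => if x = '"' then "%c0%a2".toList else [x]))
      = pvEncOf c := by
  by_cases h1 : c = '/'
  · subst h1; decide
  by_cases h2 : c = '.'
  · subst h2; decide
  by_cases h3 : c = '<'
  · subst h3; decide
  by_cases h4 : c = '>'
  · subst h4; decide
  by_cases h5 : c = '\''
  · subst h5; decide
  by_cases h6 : c = '"'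
  · subst h6; decide
  simp [pvEncOf, h1, h2, h3, h4, h5, h6]

theorem pv_a_chars (l : List Char) :
    ((((((l.flatMap (fun x => if x = '/' then "%c0%af".toList else [x])).flatMap
        (fun x => if x = '.' then "%c0%2e".toList else [x])).flatMap
        (fun x => if x = '<' then "%c0%bc".toList else [x])).flatMap
        (fun x => if x = '>' then "%c0%be".toList else [x])).flatMap
        (fun x => if x = '\'' then "%c0%a7".toList else [x])).flatMap
        (fun x => if x = '"' then "%c0%a2".toList else [x]))
      = l.flatMap pvEncOf := by
  induction l with
  | nil => simp
  | cons c t ih =>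
    simp only [List.flatMap_cons, List.flatMap_append]
    rw [ih, ← pv_chain_single c]
    simp

-- B's if/elif chain computes pvEncOf characterwise
theorem pv_encChar_toList (c : Char) : (encChar c).toList = pvEncOf c := by
  unfold encChar pvEncOf
  split_ifs <;> simp

theorem pv_join_map (l : List Char) :
    PySem.Chars.join ("" : String).toList ((l.map encChar).map String.toList)
      = l.flatMap pvEncOf := by
  rw [List.map_map]
  have hmap : (String.toList ∘ encChar) = pvEncOf := by
    funext c; exact pv_encChar_toList c
  rw [hmap]
  induction l with
  | nil => simp [PySem.Chars.join, List.intercalate]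
  | cons c t ih =>
    simp only [List.map_cons, List.flatMap_cons, PySem.Chars.join, List.intercalate, ← ih]
    cases t <;> simp

theorem overlong_utf8_eq (payload : String) :
    overlong_utf8 payload = overlong_utf8_alt payload := by
  apply String.toList_injective
  rw [overlong_utf8, overlong_utf8_alt]
  rw [PySem.List.foldl_append_singleton_eq_map]
  simp only [overlongPairs, List.foldl_cons, List.foldl_nil, PySem.Str.replace]
  simp only [PySem.Str.toList_join, List.nil_append]
  rw [show ("/" : String).toList = ['/'] from by decide,
      show ("." : String).toList = ['.'] from by decide,
      show ("<" : String).toList = ['<'] from by decide,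
      show (">" : String).toList = ['>'] from by decide,
      show ("'" : String).toList = ['\''] from by decide,
      show ("\"" : String).toList = ['"'] from by decide]
  rw [pv_replace_single, pv_replace_single, pv_replace_single, pv_replace_single,
      pv_replace_single, pv_replace_single]
  simp only [String.toList_ofList]
  rw [pv_a_chars, pv_join_map]

-- ===== VERDICT (by name: the statement is the Claim_ definition above) =====
theorem overlong_utf8_spec : Claim_equal_overlong_utf8 := by
  intro payload _
  exact overlong_utf8_eq payload
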